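-- pv_equiv track=rewrite | github.com/MarianoChun/Cancionero-TP-IP | funcionesVACIAS.py | esCorrecta
-- ===== SOURCE A (Python) =====
-- def artista(listaArtistas):
--     nombreArtista = ""
--     listaArtistasNueva = []
--     for linea in listaArtistas:
--         for letra in linea:
--             if letra != ";":
--                 nombreArtista = nombreArtista + letra
--             else:
--                 listaArtistasNueva.append(nombreArtista)
--                 nombreArtista = ""
--     return listaArtistasNueva
--
-- def puntos(rtasCorrectas):
--     #devuelve el puntaje, segun seguidilla
--     puntaje = 0
--     if rtasCorrectas == 0:
--         puntaje = -5
--     elif rtasCorrectas >= 1: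
--         puntaje = 2 ** (rtasCorrectas - 1) # Si hay una rta correcta, hacer 2 ** 0, que es 1. Si hay dos, hacer 2 ** 1, que es 2,etc.
--     return puntaje
--
-- def esCorrecta(palabraUsuario, artistaYCancion, correctas):
--     #chequea que sea correcta, que pertenece solo a la frase siguiente. Devuelve puntaje segun seguidilla
--     nombresArtistasYCanciones = artista(artistaYCancion)
--     respuestas = correctas
--
--     for elemento in nombresArtistasYCanciones:
--         if palabraUsuario == elemento:
--                 if correctas == 0:
--                     return puntos(respuestas + 1)
--                 else:
--                     return puntos(respuestas)
--
--     respuestas = 0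
--     return puntos(respuestas)
-- ===== SOURCE B (Python) =====
-- def puntos(rtasCorrectas):
--     # scoring by streak, unchanged from the original module
--     puntaje = 0
--     if rtasCorrectas == 0:
--         puntaje = -5
--     elif rtasCorrectas >= 1:
--         puntaje = 2 ** (rtasCorrectas - 1)
--     return puntaje
--
-- def esCorrecta(palabraUsuario, artistaYCancion, correctas):
--     # one library parse instead of the char-by-char accumulator:
--     # names are the ';'-terminated segments of the concatenated lines,
--     # so split on ';' and drop the trailing (unterminated) segment.
--     nombres = "".join(artistaYCancion).split(";")[:-1]
--     if palabraUsuario in nombres: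
--         return puntos(correctas + 1 if correctas == 0 else correctas)
--     return puntos(0)
-- ===== Notes on version B (the rewrite author's own statement) =====
-- stated objective: simpler
-- what changed: The hand-written two-level character accumulator parser (artista) is replaced by one library parse — join the lines, split on ';', drop the trailing unterminated segment — and the early-return search loop by a single membership test.
import Mathlib
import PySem

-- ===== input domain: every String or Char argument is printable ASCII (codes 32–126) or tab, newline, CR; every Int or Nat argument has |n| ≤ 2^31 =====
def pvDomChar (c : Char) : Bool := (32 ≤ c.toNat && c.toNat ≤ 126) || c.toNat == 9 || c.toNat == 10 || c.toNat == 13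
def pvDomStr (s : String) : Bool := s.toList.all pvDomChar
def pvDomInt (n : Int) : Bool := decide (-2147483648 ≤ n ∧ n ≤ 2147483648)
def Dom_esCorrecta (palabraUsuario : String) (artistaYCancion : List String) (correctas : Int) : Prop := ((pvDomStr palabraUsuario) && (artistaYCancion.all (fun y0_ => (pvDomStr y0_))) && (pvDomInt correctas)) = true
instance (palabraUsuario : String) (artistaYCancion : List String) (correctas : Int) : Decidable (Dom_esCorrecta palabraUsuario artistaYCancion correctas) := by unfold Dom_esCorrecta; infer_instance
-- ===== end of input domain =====

-- B replaces A's character-by-character accumulator parser and early-return search loop by one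
-- library parse (join, split on ';', drop the trailing unterminated segment) plus a membership test;
-- objective: simpler. Python strings are represented uniformly as List Char inside both ports.

-- ===== PORT A =====
-- artista: two nested loops accumulating the current name char by char, flushing on ';'
def artistaStep (st : List Char × List (List Char)) (letra : Char) : List Char × List (List Char) :=
  if letra ≠ ';' then (st.1 ++ [letra], st.2)
  else ([], st.2 ++ [st.1])

def artista (listaArtistas : List String) : List (List Char) :=
  (listaArtistas.foldl (fun st linea => linea.toList.foldl artistaStep st) ([], [])).2

def puntos (rtasCorrectas : Int) : Int :=
  let puntaje : Int := 0
  if rtasCorrectas == 0 then -5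
  else if rtasCorrectas ≥ 1 then 2 ^ (rtasCorrectas - 1).toNat
  else puntaje

-- the for-loop with its two early returns, as a structural recursion returning Option
def esCorrectaLoop (palabraUsuario : String) (correctas : Int) : List (List Char) → Option Int
  | [] => none
  | elemento :: rest =>
    if palabraUsuario.toList == elemento then
      (if correctas == 0 then some (puntos (correctas + 1)) else some (puntos correctas))
    else esCorrectaLoop palabraUsuario correctas rest

def esCorrecta (palabraUsuario : String) (artistaYCancion : List String) (correctas : Int) : Int :=
  let nombresArtistasYCanciones := artista artistaYCancion
  match esCorrectaLoop palabraUsuario correctas nombresArtistasYCanciones with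
  | some v => v
  | none => puntos 0

-- ===== PORT B =====
def puntosB (rtasCorrectas : Int) : Int :=
  let puntaje : Int := 0
  if rtasCorrectas == 0 then -5
  else if rtasCorrectas ≥ 1 then 2 ^ (rtasCorrectas - 1).toNat
  else puntaje

def esCorrecta_alt (palabraUsuario : String) (artistaYCancion : List String) (correctas : Int) : Int :=
  -- nombres = "".join(artistaYCancion).split(";")[:-1]
  let nombres := (PySem.Chars.splitOn
      (PySem.Chars.join [] (artistaYCancion.map String.toList)) [';']).dropLast
  if nombres.contains palabraUsuario.toList then
    puntosB (if correctas == 0 then correctas + 1 else correctas)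
  else puntosB 0

-- ===== PRECONDITION & SPEC =====
def Spec_esCorrecta (palabraUsuario : String) (artistaYCancion : List String) (correctas : Int) (out : Int) : Prop := out = esCorrecta_alt palabraUsuario artistaYCancion correctas
instance (palabraUsuario : String) (artistaYCancion : List String) (correctas : Int) (out : Int) : Decidable (Spec_esCorrecta palabraUsuario artistaYCancion correctas out) := by unfold Spec_esCorrecta; infer_instance

-- ===== CLAIM (what is proved, stated in full; the proofs are below) =====
def Claim_equal_esCorrecta : Prop := ∀ (palabraUsuario : String) (artistaYCancion : List String) (correctas : Int), Dom_esCorrecta palabraUsuario artistaYCancion correctas → Spec_esCorrecta palabraUsuario artistaYCancion correctas (esCorrecta palabraUsuario artistaYCancion correctas)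

-- ===== LEMMAS AND PROOFS =====

-- a simple recursive characterisation of splitting a char list on ';'
def sp : List Char → List Char → List (List Char)
  | cur, [] => [cur]
  | cur, c :: rest => if c = ';' then cur :: sp [] rest else sp (cur ++ [c]) rest

theorem sp_ne_nil (cur l : List Char) : sp cur l ≠ [] := by
  induction l generalizing cur with
  | nil => simp [sp]
  | cons c rest ih => simp only [sp]; split_ifs <;> simp [ih]

-- PySem.Chars.splitOn.go with enough fuel computes acc.reverse ++ sp cur.reverse l
theorem splitOn_go_eq (fuel : Nat) : ∀ (l cur : List Char) (acc : List (List Char)),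
    l.length ≤ fuel →
    PySem.Chars.splitOn.go [';'] fuel l cur acc = acc.reverse ++ sp cur.reverse l := by
  induction fuel with
  | zero =>
    intro l cur acc h
    have : l = [] := by cases l <;> simp_all
    subst this
    simp [PySem.Chars.splitOn.go, sp]
  | succ n ih =>
    intro l cur acc h
    cases l with
    | nil => simp [PySem.Chars.splitOn.go, sp]
    | cons c rest =>
      simp only [PySem.Chars.splitOn.go]
      by_cases hc : c = ';'
      · subst hc
        have hpre : [';'].isPrefixOf (';' :: rest) = true := by
          simp [List.isPrefixOf]
        simp only [hpre, if_pos]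
        rw [ih _ _ _ (by simpa using Nat.le_of_succ_le_succ h)]
        simp [sp]
      · have hpre : [';'].isPrefixOf (c :: rest) = false := by
          simp only [List.isPrefixOf]
          simp only [Bool.and_eq_false_iff, beq_eq_false_iff_ne, ne_eq]
          exact Or.inl fun h => hc h.symm
        rw [if_neg (by simp [hpre]), ih _ _ _ (by simpa using Nat.le_of_succ_le_succ h)]
        simp [sp, hc]

theorem splitOn_eq_sp (l : List Char) : PySem.Chars.splitOn l [';'] = sp [] l := by
  unfold PySem.Chars.splitOn
  rw [splitOn_go_eq _ _ _ _ (by omega)]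
  simp

-- A's char scanner over the flattened input equals (last segment, dropLast of the split)
theorem foldl_artistaStep (l : List Char) : ∀ (cur : List Char) (acc : List (List Char)),
    l.foldl artistaStep (cur, acc) = ((sp cur l).getLastD [], acc ++ (sp cur l).dropLast) := by
  induction l with
  | nil => intro cur acc; simp [sp]
  | cons c rest ih =>
    intro cur acc
    by_cases hc : c = ';'
    · subst hc
      have hstep : artistaStep (cur, acc) ';' = ([], acc ++ [cur]) := by simp [artistaStep]
      simp only [List.foldl_cons, hstep]
      rw [ih]
      obtain ⟨a, t, h⟩ : ∃ a t, sp [] rest = a :: t := by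
        cases h : sp [] rest with
        | nil => exact absurd h (sp_ne_nil [] rest)
        | cons a t => exact ⟨a, t, rfl⟩
      simp [sp, h, List.getLastD]
    · have hstep : artistaStep (cur, acc) c = (cur ++ [c], acc) := by simp [artistaStep, hc]
      simp only [List.foldl_cons, hstep]
      rw [ih]
      simp [sp, hc]

-- Chars.join with empty separator is flatten
theorem join_nil_eq_flatten (ps : List (List Char)) : PySem.Chars.join [] ps = ps.flatten := by
  induction ps with
  | nil => simp [PySem.Chars.join, List.intercalate]
  | cons p t ih =>
    cases t with
    | nil => simp [PySem.Chars.join, List.intercalate]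
    | cons q t' =>
      simp only [PySem.Chars.join, List.intercalate] at *
      simp [List.intersperse] at *
      simpa using ih

-- artista equals dropLast of the split of the concatenation
theorem artista_eq (la : List String) :
    artista la = (sp [] (la.map String.toList).flatten).dropLast := by
  unfold artista
  have : la.foldl (fun st linea => linea.toList.foldl artistaStep st) ([], []) =
      ((la.map String.toList).flatten).foldl artistaStep ([], []) := by
    rw [List.foldl_flatten, List.foldl_map]
  rw [this, foldl_artistaStep]
  simp

-- the early-return loop is a membership test
theorem loop_eq_contains (p : String) (c : Int) (ns : List (List Char)) :
    esCorrectaLoop p c ns =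
      (if ns.contains p.toList then
        some (if c == 0 then puntos (c + 1) else puntos c) else none) := by
  induction ns with
  | nil => simp [esCorrectaLoop]
  | cons e rest ih =>
    simp only [esCorrectaLoop, List.contains_cons]
    by_cases he : p.toList = e
    · simp [he]
      split_ifs <;> simp_all
    · have : (p.toList == e) = false := by simpa using he
      simp [this, ih]

-- ===== VERDICT (by name: the statement is the Claim_ definition above) =====
theorem esCorrecta_spec : Claim_equal_esCorrecta := by
  intro p la c _
  unfold Spec_esCorrecta esCorrecta esCorrecta_alt
  simp only [artista_eq, loop_eq_contains, join_nil_eq_flatten, splitOn_eq_sp]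
  have hpb : puntos = puntosB := rfl
  by_cases h : ((sp [] (la.map String.toList).flatten).dropLast).contains p.toList
  · simp only [h, if_pos, hpb]
    split_ifs <;> rfl
  · have h' : p.toList ∉ (sp [] (la.map String.toList).flatten).dropLast := by simpa using h
    simp [h']
    rfl
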